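-- pv_equiv track=rewrite | github.com/pypi-data/pypi-mirror-318 | packages/sherbystats/sherbystats-0.0.32.tar.gz/sherbystats-0.0.32/sherbystats/anova.py | get_index_positions
-- ===== SOURCE A (Python) =====
-- def get_index_positions(list_of_elems, element):
--     ''' Returns the indexes of all occurrences of give element in
--     the list- listOfElements '''
--     index_pos_list = []
--     index_pos = 0
--     while True:
--         try:
--             # Search for item in list from indexPos to the end of list
--             index_pos = list_of_elems.index(element, index_pos)
--             # Add the index position in list
--             index_pos_list.append(index_pos)
--             index_pos += 1
--         #except ValueError as e:
--         except:
--             break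
--     return index_pos_list
-- ===== SOURCE B (Python) =====
-- def get_index_positions(list_of_elems, element):
--     ''' Returns the indexes of all occurrences of give element in
--     the list- listOfElements '''
--     return [i for i, x in enumerate(list_of_elems) if x is element or x == element]
-- ===== Notes on version B (the rewrite author's own statement) =====
-- stated objective: simpler
-- what changed: Replaces the exception-driven while/try loop of repeated list.index calls with a resume pointer by a single enumerate comprehension collecting matching indices.
import Mathlib
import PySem

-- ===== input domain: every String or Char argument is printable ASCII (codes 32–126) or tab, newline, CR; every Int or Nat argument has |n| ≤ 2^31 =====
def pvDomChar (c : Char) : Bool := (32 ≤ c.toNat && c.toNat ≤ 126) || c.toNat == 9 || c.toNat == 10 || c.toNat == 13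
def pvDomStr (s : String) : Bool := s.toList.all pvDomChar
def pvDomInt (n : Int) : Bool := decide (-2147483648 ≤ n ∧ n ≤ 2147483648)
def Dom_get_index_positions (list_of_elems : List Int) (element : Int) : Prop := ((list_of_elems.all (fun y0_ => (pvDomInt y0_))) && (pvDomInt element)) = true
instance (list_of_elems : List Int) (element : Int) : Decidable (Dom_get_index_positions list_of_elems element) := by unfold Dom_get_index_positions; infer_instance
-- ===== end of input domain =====

-- B replaces A's exception-driven while/try loop of repeated list.index calls by a
-- single enumerate pass collecting matching indices (objective: simpler).

-- ===== PORT A =====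
-- list.index(v, start): first index ≥ start holding v (none = ValueError)
def indexFrom (xs : List Int) (v : Int) (start : Nat) : Option Nat :=
  (PySem.List.index? (xs.drop start) v).map (· + start)

theorem indexFrom_some {xs : List Int} {v : Int} {start i : Nat}
    (h : indexFrom xs v start = some i) :
    ∃ k, PySem.List.index? (xs.drop start) v = some k ∧ i = k + start := by
  unfold indexFrom at h
  obtain ⟨k, hk, rfl⟩ := Option.map_eq_some_iff.mp h
  exact ⟨k, hk, rfl⟩

theorem indexFrom_lt {xs : List Int} {v : Int} {start i : Nat}
    (h : indexFrom xs v start = some i) : i < xs.length ∧ start ≤ i := by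
  obtain ⟨k, hk, rfl⟩ := indexFrom_some h
  obtain ⟨hlt, _, _⟩ := PySem.List.getElem_of_index?_eq_some hk
  rw [List.length_drop] at hlt
  omega

def gipLoop (xs : List Int) (e : Int) (start : Nat) (acc : List Int) : List Int :=
  match h : indexFrom xs e start with
  | none => acc
  | some i => gipLoop xs e (i + 1) (acc ++ [(i : Int)])
termination_by xs.length - start
decreasing_by
  have := indexFrom_lt h
  omega

def get_index_positions (list_of_elems : List Int) (element : Int) : List Int :=
  gipLoop list_of_elems element 0 []

-- ===== PORT B =====
def get_index_positions_alt (list_of_elems : List Int) (element : Int) : List Int :=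
  (PySem.List.enumerate list_of_elems 0).filterMap
    (fun p => if p.2 = element then some p.1 else none)

-- ===== PRECONDITION & SPEC =====
def Spec_get_index_positions (list_of_elems : List Int) (element : Int) (out : List Int) : Prop := out = get_index_positions_alt list_of_elems element
instance (list_of_elems : List Int) (element : Int) (out : List Int) : Decidable (Spec_get_index_positions list_of_elems element out) := by unfold Spec_get_index_positions; infer_instance

-- ===== CLAIM =====
def Claim_equal_get_index_positions : Prop := ∀ (list_of_elems : List Int) (element : Int), Dom_get_index_positions list_of_elems element → Spec_get_index_positions list_of_elems element (get_index_positions list_of_elems element)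

-- ===== LEMMAS AND PROOFS =====
theorem fm_enumerate_not_mem {e : Int} {l : List Int} (h : e ∉ l) (s : Int) :
    (PySem.List.enumerate l s).filterMap
      (fun p => if p.2 = e then some p.1 else none) = [] := by
  induction l generalizing s with
  | nil => simp [PySem.List.enumerate_nil]
  | cons x t ih =>
    simp at h
    have hx : x ≠ e := fun hh => h.1 hh.symm
    rw [PySem.List.enumerate_cons, List.filterMap_cons]
    simpa [hx] using ih h.2 (s + 1)

theorem gipLoop_eq (xs : List Int) (e : Int) (start : Nat) (acc : List Int) :
    gipLoop xs e start acc = acc ++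
      (PySem.List.enumerate (xs.drop start) (start : Int)).filterMap
        (fun p => if p.2 = e then some p.1 else none) := by
  rw [gipLoop]
  cases h : indexFrom xs e start with
  | none =>
    have : e ∉ xs.drop start := by
      unfold indexFrom at h
      rw [Option.map_eq_none_iff] at h
      exact (PySem.List.index?_eq_none_iff _ _).mp h
    simp [fm_enumerate_not_mem this]
  | some i =>
    have hlt := indexFrom_lt h
    show gipLoop xs e (i + 1) (acc ++ [(i : Int)]) = _
    obtain ⟨k, hk, hik⟩ := indexFrom_some h
    obtain ⟨pre, suf, hsplit, hlen, hnot⟩ := (PySem.List.index?_eq_some_iff _ _ _).mp hk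
    have ih := gipLoop_eq xs e (i + 1) (acc ++ [(i : Int)])
    rw [ih]
    have hdrop : xs.drop (i + 1) = suf := by
      have : xs.drop (i + 1) = (xs.drop start).drop (k + 1) := by
        rw [List.drop_drop]; congr 1; omega
      rw [this, hsplit, show pre ++ e :: suf = (pre ++ [e]) ++ suf by simp,
          List.drop_left' (by simp [hlen])]
    rw [hdrop, hsplit, PySem.List.enumerate_append, List.filterMap_append,
        fm_enumerate_not_mem hnot]
    simp [PySem.List.enumerate_cons, hlen, hik]
    rw [Int.add_comm (k : Int) (start : Int)]
    simp
termination_by xs.length - start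
decreasing_by
  have := indexFrom_lt h
  omega

-- ===== VERDICT =====
theorem get_index_positions_spec : Claim_equal_get_index_positions := by
  intro xs e _
  unfold Spec_get_index_positions get_index_positions get_index_positions_alt
  simpa using gipLoop_eq xs e 0 []
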